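-- pv_equiv track=rewrite | github.com/tramnhatquang/LeetCode-Solutions-Python | Twitter OA - Unique Twitter User ID Set.py | get_sum_optimal
-- ===== SOURCE A (Python) =====
-- from collections import Counter
-- from typing import List
--
-- def get_sum_optimal(l: List[int]) -> int:
-- 	total = 0
-- 	elements = Counter(l)
-- 	min_element = min(l)
-- 	max_element = max(l)
-- 	for i in range(min_element, max_element):
-- 		if i in elements:
-- 			total += i
-- 			if elements[i] > 1:
-- 				if (i + 1) in elements:
-- 					elements[i + 1] += elements[i] - 1
-- 				else:
-- 					elements[i + 1] = elements[i] - 1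
-- 	if max_element in elements:
-- 		total += (2 * max_element + elements[max_element] - 1) * elements[max_element] // 2
-- 	return total
-- ===== SOURCE B (Python) =====
-- from typing import List
--
-- def get_sum_optimal(l: List[int]) -> int:
--     total = 0
--     prev = None
--     for v in sorted(l):
--         cur = v if prev is None or v > prev else prev + 1
--         total += cur
--         prev = cur
--     return total
-- ===== Notes on version B (the rewrite author's own statement) =====
-- stated objective: faster
-- what changed: Instead of cascading duplicate counts through a Counter over every integer in range(min, max), B sorts the list once and greedily raises each element to max(prev+1, value), summing in one pass.
import Mathlib
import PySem

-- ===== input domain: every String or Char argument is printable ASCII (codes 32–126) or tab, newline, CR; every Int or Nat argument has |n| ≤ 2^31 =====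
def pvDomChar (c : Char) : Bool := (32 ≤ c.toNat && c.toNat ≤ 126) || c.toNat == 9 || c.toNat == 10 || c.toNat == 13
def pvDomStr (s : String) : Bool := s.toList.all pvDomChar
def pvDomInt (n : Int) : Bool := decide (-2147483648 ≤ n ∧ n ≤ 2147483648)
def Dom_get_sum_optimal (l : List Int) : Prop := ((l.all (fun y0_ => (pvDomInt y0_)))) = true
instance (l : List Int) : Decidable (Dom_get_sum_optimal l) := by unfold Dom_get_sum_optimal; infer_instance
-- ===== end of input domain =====

-- B replaces A's Counter-cascade over the whole integer range [min, max) by a single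
-- sort-then-greedy pass (faster when the value range is much larger than the list).

-- ===== PORT A =====
def get_sum_optimal (l : List Int) : Int :=
  match PySem.List.min? l (fun x => x), PySem.List.max? l (fun x => x) with
  | some min_element, some max_element =>
    let st := (PySem.List.pyRange min_element max_element 1).foldl
      (fun (st : Int × PySem.Dict Int Int) i =>
        if st.2.contains i then
          let t := st.1 + i
          if st.2.getD i 0 > 1 then
            if st.2.contains (i + 1) then
              (t, st.2.insert (i + 1) (st.2.getD (i + 1) 0 + (st.2.getD i 0 - 1)))
            else
              (t, st.2.insert (i + 1) (st.2.getD i 0 - 1))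
          else (t, st.2)
        else st)
      (0, PySem.Dict.counter l)
    if st.2.contains max_element then
      st.1 + PySem.Int.floordiv ((2 * max_element + st.2.getD max_element 0 - 1) * st.2.getD max_element 0) 2
    else st.1
  | _, _ => 0   -- unreachable under Pre_ (Python raises ValueError on min([]))

-- ===== PORT B =====
def get_sum_optimal_alt (l : List Int) : Int :=
  ((PySem.List.sorted l (fun x => x) false).foldl
    (fun (st : Int × Option Int) v =>
      let cur := match st.2 with
        | none => v
        | some p => if v > p then v else p + 1
      (st.1 + cur, some cur))
    (0, none)).1

-- ===== PRECONDITION & SPEC =====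
-- Pre_ excludes only the empty list, on which Python's A raises ValueError (min of empty sequence).
def Pre_get_sum_optimal (l : List Int) : Prop := l ≠ []
instance (l : List Int) : Decidable (Pre_get_sum_optimal l) := by unfold Pre_get_sum_optimal; infer_instance
def pvWitness_get_sum_optimal : List Int := [1, 1, 2]

def Spec_get_sum_optimal (l : List Int) (out : Int) : Prop := out = get_sum_optimal_alt l
instance (l : List Int) (out : Int) : Decidable (Spec_get_sum_optimal l out) := by unfold Spec_get_sum_optimal; infer_instance

-- ===== CLAIM (what is proved, stated in full; the proofs are below) =====
def Claim_equal_get_sum_optimal : Prop := ∀ (l : List Int), Dom_get_sum_optimal l → Pre_get_sum_optimal l → Spec_get_sum_optimal l (get_sum_optimal l)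

-- ===== LEMMAS AND PROOFS =====

-- Greedy sum with previous assigned value p: each element is raised to max (p+1, v).
def gsum (p : Int) : List Int → Int
  | [] => 0
  | v :: vs => (if p < v then v else p + 1) + gsum (if p < v then v else p + 1) vs

-- The sorted multiset held by a count function f on the interval [i, i+d].
def eexp (i : Int) (f : Int → Int) : Nat → List Int
  | 0 => List.replicate (f i).toNat i
  | d + 1 => List.replicate (f i).toNat i ++ eexp (i + 1) f d

-- A's loop body and overall computation, named for the proofs.
def stepA (st : Int × PySem.Dict Int Int) (i : Int) : Int × PySem.Dict Int Int :=
  if st.2.contains i then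
    let t := st.1 + i
    if st.2.getD i 0 > 1 then
      if st.2.contains (i + 1) then
        (t, st.2.insert (i + 1) (st.2.getD (i + 1) 0 + (st.2.getD i 0 - 1)))
      else
        (t, st.2.insert (i + 1) (st.2.getD i 0 - 1))
    else (t, st.2)
  else st

def runA (mn mx t : Int) (d : PySem.Dict Int Int) : Int :=
  let st := (PySem.List.pyRange mn mx 1).foldl stepA (t, d)
  if st.2.contains mx then
    st.1 + PySem.Int.floordiv ((2 * mx + st.2.getD mx 0 - 1) * st.2.getD mx 0) 2
  else st.1

theorem gsum_replicate_le (n : Nat) (p v : Int) (h : v ≤ p) :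
    2 * gsum p (List.replicate n v) = n * (2 * p + n + 1) := by
  induction n generalizing p with
  | zero => simp [gsum]
  | succ n ih =>
      have hlt : ¬ p < v := not_lt.mpr h
      have ih' := ih (p + 1) (by omega)
      simp only [List.replicate_succ, gsum, hlt, if_false]
      push_cast at ih' ⊢
      linarith [ih', mul_comm (n : Int) (2 * (p + 1) + n + 1)]

theorem gsum_replicate_lt (n : Nat) (p v : Int) (h : p < v) :
    2 * gsum p (List.replicate n v) = n * (2 * v + n - 1) := by
  cases n with
  | zero => simp [gsum]
  | succ n =>
      have h2 := gsum_replicate_le n v v le_rfl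
      simp only [List.replicate_succ, gsum, h, if_true]
      push_cast at h2 ⊢
      linarith [h2]

theorem gsum_eq_of_lt_head (s : List Int) (p p' : Int)
    (h : ∀ x ∈ s, p < x ∧ p' < x) : gsum p s = gsum p' s := by
  cases s with
  | nil => rfl
  | cons v vs =>
      obtain ⟨h1, h2⟩ := h v (List.mem_cons_self ..)
      simp [gsum, h1, h2]

theorem gsum_replicate_congr (n : Nat) (p v w : Int) (s : List Int)
    (hv : v ≤ p + 1) (hw : w ≤ p + 1) :
    gsum p (List.replicate n v ++ s) = gsum p (List.replicate n w ++ s) := by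
  induction n generalizing p with
  | zero => rfl
  | succ n ih =>
      have hv' : (if p < v then v else p + 1) = p + 1 := by split_ifs <;> omega
      have hw' : (if p < w then w else p + 1) = p + 1 := by split_ifs <;> omega
      simp only [List.replicate_succ, List.cons_append, gsum, hv', hw']
      rw [ih (p + 1) (by omega) (by omega)]

theorem gsum_bump (n : Nat) (p v : Int) (s : List Int) (h : p < v) :
    gsum p (List.replicate (n + 1) v ++ s) = v + gsum v (List.replicate n (v + 1) ++ s) := by
  simp only [List.replicate_succ, List.cons_append, gsum, h, if_true]
  rw [gsum_replicate_congr n v v (v + 1) s (by omega) (by omega)]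

theorem eexp_congr (d : Nat) (i : Int) (f g : Int → Int)
    (h : ∀ j, i ≤ j → j ≤ i + d → f j = g j) : eexp i f d = eexp i g d := by
  induction d generalizing i with
  | zero => simp [eexp, h i le_rfl (by omega)]
  | succ d ih =>
      simp only [eexp, h i le_rfl (by push_cast; omega)]
      rw [ih (i + 1) (fun j h1 h2 => h j (by omega) (by push_cast at h2 ⊢; omega))]

theorem mem_eexp (d : Nat) (i : Int) (f : Int → Int) (x : Int)
    (hx : x ∈ eexp i f d) : i ≤ x ∧ x ≤ i + d := by
  induction d generalizing i with
  | zero => simp [eexp] at hx; omega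
  | succ d ih =>
      simp only [eexp, List.mem_append, List.mem_replicate] at hx
      rcases hx with ⟨-, rfl⟩ | hx
      · omega
      · have := ih (i + 1) hx
        push_cast at this ⊢
        omega

theorem count_eexp (d : Nat) (i : Int) (f : Int → Int) (j : Int) :
    (eexp i f d).count j = if i ≤ j ∧ j ≤ i + d then (f j).toNat else 0 := by
  induction d generalizing i with
  | zero =>
      simp only [eexp, List.count_replicate]
      by_cases h : i = j
      · subst h; rw [if_pos (by simp), if_pos (by push_cast; omega)]
      · rw [if_neg (by simp [h]), if_neg (by push_cast; omega)]
  | succ d ih =>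
      simp only [eexp, List.count_append, List.count_replicate, ih (i + 1)]
      push_cast
      by_cases h : i = j
      · subst h
        rw [if_pos (by simp), if_neg (by omega), if_pos (by omega)]
        omega
      · rw [if_neg (by simp [h])]
        split_ifs <;> omega

theorem pairwise_eexp (d : Nat) (i : Int) (f : Int → Int) :
    (eexp i f d).Pairwise (· ≤ ·) := by
  induction d generalizing i with
  | zero =>
      exact List.pairwise_replicate.mpr (Or.inr le_rfl)
  | succ d ih =>
      simp only [eexp]
      refine List.pairwise_append.mpr ⟨List.pairwise_replicate.mpr (Or.inr le_rfl), ih (i + 1), ?_⟩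
      intro a ha b hb
      have hb' := (mem_eexp d (i + 1) f b hb).1
      have ha' := (List.mem_replicate.mp ha).2
      omega

-- The main invariant lemma: running A's loop from i to mx = i + d equals
-- the greedy sum of the multiset expansion of the dict's counts on [i, mx].
theorem getD_nonneg (dct : PySem.Dict Int Int)
    (hinv : ∀ j, dct.contains j = true ↔ 1 ≤ dct.getD j 0) (j : Int) :
    0 ≤ dct.getD j 0 := by
  by_cases hc : dct.contains j = true
  · have := (hinv j).mp hc; omega
  · rw [PySem.Dict.getD_of_not_contains dct 0 (by simpa using hc)]

theorem eexp_head_add (d : Nat) (i a : Int) (f f' : Int → Int)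
    (ha : 0 ≤ a) (h0 : 0 ≤ f i) (hf' : f' i = f i + a)
    (hrest : ∀ j, i + 1 ≤ j → j ≤ i + d → f' j = f j) :
    eexp i f' d = List.replicate a.toNat i ++ eexp i f d := by
  have htn : (f' i).toNat = a.toNat + (f i).toNat := by omega
  cases d with
  | zero =>
      simp only [eexp, htn, List.replicate_add]
  | succ d =>
      simp only [eexp, htn, List.replicate_add, List.append_assoc]
      rw [eexp_congr d (i + 1) f' f (fun j h1 h2 => hrest j h1 (by push_cast at h2 ⊢; omega))]

theorem runA_eq_gsum (d : Nat) (i t : Int) (dct : PySem.Dict Int Int)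
    (hinv : ∀ j, dct.contains j = true ↔ 1 ≤ dct.getD j 0)
    (hmx : 1 ≤ dct.getD (i + d) 0) :
    runA i (i + d) t dct = t + gsum (i - 1) (eexp i (fun j => dct.getD j 0) d) := by
  induction d generalizing i t dct with
  | zero =>
      have hk : 1 ≤ dct.getD i 0 := by simpa using hmx
      have hc : dct.contains i = true := (hinv i).mpr hk
      have hrange : PySem.List.pyRange i i 1 = [] :=
        PySem.List.pyRange_one_eq_nil le_rfl
      simp only [runA, Nat.cast_zero, add_zero, hrange, List.foldl_nil, hc, if_true, eexp]
      have h2 : 2 * gsum (i - 1) (List.replicate (dct.getD i 0).toNat i)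
          = ((dct.getD i 0).toNat : Int) * (2 * i + (dct.getD i 0).toNat - 1) :=
        gsum_replicate_lt _ _ _ (by omega)
      have hcast : ((dct.getD i 0).toNat : Int) = dct.getD i 0 := by omega
      rw [hcast] at h2
      have heven : (2 * i + dct.getD i 0 - 1) * dct.getD i 0
          = 2 * gsum (i - 1) (List.replicate (dct.getD i 0).toNat i) := by
        rw [h2]; ring
      rw [heven, PySem.Int.floordiv_eq_ediv_of_pos (by norm_num),
        Int.mul_ediv_cancel_left _ (by norm_num)]
  | succ d ih =>
      have hmx_eq : i + ((d + 1 : Nat) : Int) = (i + 1) + (d : Int) := by push_cast; ring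
      have hlt : i < i + ((d + 1 : Nat) : Int) := by push_cast; omega
      have hnn := getD_nonneg dct hinv
      by_cases hc : dct.contains i = true
      · have hk : 1 ≤ dct.getD i 0 := (hinv i).mp hc
        by_cases hk1 : 1 < dct.getD i 0
        · -- duplicate bucket at i: extras move to i + 1
          -- the dict after the step, uniformly
          obtain ⟨dct', hstep, hd', hc'⟩ :
              ∃ dct', stepA (t, dct) i = (t + i, dct') ∧
                (∀ j, dct'.getD j 0 = if j = i + 1 then dct.getD (i + 1) 0 + (dct.getD i 0 - 1) else dct.getD j 0) ∧
                (∀ j, dct'.contains j = true ↔ (j = i + 1 ∨ dct.contains j = true)) := by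
            by_cases hc1 : dct.contains (i + 1) = true
            · refine ⟨dct.insert (i + 1) (dct.getD (i + 1) 0 + (dct.getD i 0 - 1)), ?_, ?_, ?_⟩
              · simp [stepA, hc, hc1, hk1]
              · intro j; rw [PySem.Dict.getD_insert]
              · intro j; simp [PySem.Dict.contains_insert]
            · refine ⟨dct.insert (i + 1) (dct.getD i 0 - 1), ?_, ?_, ?_⟩
              · simp [stepA, hc, hc1, hk1]
              · intro j
                have h0 : dct.getD (i + 1) 0 = 0 :=
                  PySem.Dict.getD_of_not_contains dct 0 (by simpa using hc1)
                rw [PySem.Dict.getD_insert, h0]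
                split_ifs <;> omega
              · intro j; simp [PySem.Dict.contains_insert]
          have hinv' : ∀ j, dct'.contains j = true ↔ 1 ≤ dct'.getD j 0 := by
            intro j
            rw [hc' j, hd' j]
            by_cases hj : j = i + 1
            · rw [if_pos hj]
              have h1 := hnn (i + 1)
              constructor
              · intro _; omega
              · intro _; exact Or.inl hj
            · rw [if_neg hj]
              constructor
              · rintro (h | h)
                · exact absurd h hj
                · exact (hinv j).mp h
              · intro h; exact Or.inr ((hinv j).mpr h)
          have hmx' : 1 ≤ dct'.getD ((i + 1) + (d : Int)) 0 := by
            rw [hd']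
            have h1 := hnn (i + 1)
            split_ifs with hj
            · omega
            · rw [hmx_eq] at hmx; exact hmx
          have key : runA i (i + ((d + 1 : Nat) : Int)) t dct
              = runA (i + 1) ((i + 1) + (d : Int)) (t + i) dct' := by
            unfold runA
            rw [PySem.List.pyRange_one_cons hlt, List.foldl_cons, hstep, hmx_eq]
          rw [key, ih (i + 1) (t + i) dct' hinv' hmx']
          -- right-hand side
          have hsplit : eexp i (fun j => dct.getD j 0) (d + 1)
              = List.replicate (dct.getD i 0).toNat i ++ eexp (i + 1) (fun j => dct.getD j 0) d := rfl
          have hbump : eexp (i + 1) (fun j => dct'.getD j 0) d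
              = List.replicate (dct.getD i 0 - 1).toNat (i + 1) ++ eexp (i + 1) (fun j => dct.getD j 0) d := by
            refine eexp_head_add d (i + 1) (dct.getD i 0 - 1) _ _ (by omega) (hnn (i + 1)) ?_ ?_
            · rw [hd']; simp
            · intro j h1 h2; rw [hd' j, if_neg (by omega)]
          have hn : (dct.getD i 0).toNat = (dct.getD i 0 - 1).toNat + 1 := by omega
          rw [hsplit, hn, gsum_bump _ _ _ _ (by omega), ← hbump]
          ring_nf
        · -- exactly one copy at i
          have hk1' : dct.getD i 0 = 1 := by omega
          have hstep : stepA (t, dct) i = (t + i, dct) := by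
            simp [stepA, hc, hk1']
          have hmx' : 1 ≤ dct.getD ((i + 1) + (d : Int)) 0 := by rw [hmx_eq] at hmx; exact hmx
          have key : runA i (i + ((d + 1 : Nat) : Int)) t dct
              = runA (i + 1) ((i + 1) + (d : Int)) (t + i) dct := by
            unfold runA
            rw [PySem.List.pyRange_one_cons hlt, List.foldl_cons, hstep, hmx_eq]
          rw [key, ih (i + 1) (t + i) dct hinv hmx']
          have hsplit : eexp i (fun j => dct.getD j 0) (d + 1)
              = List.replicate (dct.getD i 0).toNat i ++ eexp (i + 1) (fun j => dct.getD j 0) d := rfl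
          rw [hsplit, hk1']
          simp only [Int.toNat_one, List.replicate_one, List.cons_append, List.nil_append, gsum,
            if_pos (show i - 1 < i by omega)]
          ring_nf
      · -- slot i empty: no-op step
        have hstep : stepA (t, dct) i = (t, dct) := by simp [stepA, hc]
        have hf0 : dct.getD i 0 = 0 :=
          PySem.Dict.getD_of_not_contains dct 0 (by simpa using hc)
        have hmx' : 1 ≤ dct.getD ((i + 1) + (d : Int)) 0 := by rw [hmx_eq] at hmx; exact hmx
        have key : runA i (i + ((d + 1 : Nat) : Int)) t dct
            = runA (i + 1) ((i + 1) + (d : Int)) t dct := by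
          unfold runA
          rw [PySem.List.pyRange_one_cons hlt, List.foldl_cons, hstep, hmx_eq]
        rw [key, ih (i + 1) t dct hinv hmx']
        have hsplit : eexp i (fun j => dct.getD j 0) (d + 1)
            = List.replicate (dct.getD i 0).toNat i ++ eexp (i + 1) (fun j => dct.getD j 0) d := rfl
        rw [hsplit, hf0]
        simp only [Int.toNat_zero, List.replicate_zero, List.nil_append]
        congr 1
        exact (gsum_eq_of_lt_head _ _ _ (fun x hx => by
          have := (mem_eexp d (i + 1) _ x hx).1; omega)).symm

theorem foldB_some (vs : List Int) (t p : Int) :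
    (vs.foldl
      (fun (st : Int × Option Int) v =>
        let cur := match st.2 with
          | none => v
          | some p => if v > p then v else p + 1
        (st.1 + cur, some cur)) (t, some p)).1 = t + gsum p vs := by
  induction vs generalizing t p with
  | nil => simp [gsum]
  | cons v vs ih =>
      simp only [List.foldl_cons, ih, gsum]
      split_ifs <;> ring

theorem altB_eq_gsum (l : List Int) (v : Int) (vs : List Int)
    (h : PySem.List.sorted l (fun x => x) false = v :: vs) :
    get_sum_optimal_alt l = v + gsum v vs := by
  unfold get_sum_optimal_alt
  rw [h, List.foldl_cons]
  have := foldB_some vs (0 + v) v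
  simpa using this

-- ===== VERDICT (by name: the statement is the Claim_ definition above) =====
theorem get_sum_optimal_spec : Claim_equal_get_sum_optimal := by
  intro l _ hpre
  unfold Spec_get_sum_optimal
  obtain ⟨mn, hmin⟩ : ∃ mn, PySem.List.min? l (fun x => x) = some mn := by
    cases hm : PySem.List.min? l (fun x => x) with
    | none => exact absurd ((PySem.List.min?_eq_none_iff l _).mp hm) hpre
    | some m => exact ⟨m, rfl⟩
  obtain ⟨mx, hmax⟩ : ∃ mx, PySem.List.max? l (fun x => x) = some mx := by
    cases hm : PySem.List.max? l (fun x => x) with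
    | none => exact absurd ((PySem.List.max?_eq_none_iff l _).mp hm) hpre
    | some m => exact ⟨m, rfl⟩
  have hmnle : ∀ y ∈ l, mn ≤ y := PySem.List.min?_isMin hmin
  have hmxge : ∀ y ∈ l, y ≤ mx := PySem.List.max?_isMax hmax
  have hmxmem : mx ∈ l := PySem.List.max?_mem hmax
  have hle : mn ≤ mx := hmnle mx hmxmem
  have hA : get_sum_optimal l = runA mn mx 0 (PySem.Dict.counter l) := by
    unfold get_sum_optimal runA stepA
    rw [hmin, hmax]
  have hinv : ∀ j, (PySem.Dict.counter l).contains j = true ↔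
      1 ≤ (PySem.Dict.counter l).getD j 0 := by
    intro j
    rw [PySem.Dict.contains_counter, PySem.Dict.getD_counter]
    constructor
    · intro h
      have : j ∈ l := by simpa using h
      have := List.count_pos_iff.mpr this
      omega
    · intro h
      have hc : 0 < List.count j l := by omega
      simpa using List.count_pos_iff.mp hc
  set d : Nat := (mx - mn).toNat with hd
  have hmd : mn + (d : Int) = mx := by omega
  have hmx1 : 1 ≤ (PySem.Dict.counter l).getD (mn + (d : Int)) 0 := by
    rw [hmd, PySem.Dict.getD_counter]
    have := List.count_pos_iff.mpr hmxmem
    omega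
  have hrun := runA_eq_gsum d mn 0 (PySem.Dict.counter l) hinv hmx1
  rw [hmd] at hrun
  rw [hA, hrun]
  -- identify the expansion with sorted l
  set E := eexp mn (fun j => (PySem.Dict.counter l).getD j 0) d with hE
  have hperm : E.Perm l := by
    rw [List.perm_iff_count]
    intro a
    rw [hE, count_eexp, PySem.Dict.getD_counter]
    split_ifs with h
    · omega
    · by_cases hmem : a ∈ l
      · exact absurd ⟨hmnle a hmem, by have := hmxge a hmem; omega⟩ h
      · simp [List.count_eq_zero_of_not_mem hmem]
  have hsorted : PySem.List.sorted l (fun x => x) false = E :=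
    PySem.List.sorted_id_eq_of_perm_of_pairwise l E hperm (pairwise_eexp d mn _)
  obtain ⟨v, vs, hEcons⟩ : ∃ v vs, E = v :: vs := by
    cases hEc : E with
    | nil => exact absurd (hEc ▸ hperm).symm.eq_nil hpre
    | cons v vs => exact ⟨v, vs, rfl⟩
  have hvmem : v ∈ l := hperm.mem_iff.mp (hEcons ▸ List.mem_cons_self ..)
  have hvlo : mn ≤ v := hmnle v hvmem
  rw [altB_eq_gsum l v vs (by rw [hsorted, hEcons])]
  rw [hEcons]
  simp only [gsum, if_pos (show mn - 1 < v by omega)]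
  ring
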